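-- pv_equiv track=rewrite | github.com/jeremyseglem/sellersignal-v3 | backend/research/deep_signal.py | _build_research_block
-- ===== SOURCE A (Python) =====
-- def _build_research_block(parcel: dict, investigation: dict) -> tuple[str, bool]:
--     """
--     Assemble a VERIFIED RESEARCH text block from investigation signals.
--
--     Returns (text, has_substance). has_substance is False when the only
--     evidence is structural cohort data — caller can decide whether to
--     synthesize anyway or return a thin response.
--     """
--     signals = (investigation or {}).get('signals') or []
--
--     # Group by category — matches the v3 signal categorization
--     life_events = [s for s in signals if s.get('category') == 'life_event']
--     listings    = [s for s in signals if s.get('category') == 'listing']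
--     identity    = [s for s in signals if s.get('category') == 'identity']
--     financial   = [s for s in signals if s.get('category') == 'financial']
--     other       = [s for s in signals
--                    if s.get('category') not in
--                    ('life_event', 'listing', 'identity', 'financial')]
--
--     sections: list[str] = []
--
--     if life_events:
--         lines = [
--             f"  - {s.get('type', '?')}: {s.get('detail', '')} ({s.get('trust', 'medium')} trust)"
--             for s in life_events
--         ]
--         sections.append("  LIFE EVENTS:\n" + "\n".join(lines))
--
--     if listings:
--         lines = [
--             f"  - {s.get('type', '?')}: {s.get('detail', '')} ({s.get('trust', 'medium')} trust)"
--             for s in listings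
--         ]
--         sections.append("  LISTING HISTORY:\n" + "\n".join(lines))
--
--     if financial:
--         lines = [
--             f"  ⚠ {s.get('detail', '')} ({s.get('trust', 'medium')} trust)"
--             for s in financial
--         ]
--         sections.append("  FINANCIAL / RISK SIGNALS:\n" + "\n".join(lines))
--
--     if identity:
--         lines = [
--             f"  - {s.get('detail', '')} ({s.get('trust', 'medium')} trust)"
--             for s in identity
--         ]
--         sections.append("  WHO THEY ARE:\n" + "\n".join(lines))
--
--     if other:
--         lines = [
--             f"  - {s.get('type', '?')}: {s.get('detail', '')}"
--             for s in other
--         ]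
--         sections.append("  OTHER SIGNALS:\n" + "\n".join(lines))
--
--     research = "\n".join(sections).strip()
--     has_substance = bool(life_events or financial or identity or listings)
--     return research, has_substance
-- ===== SOURCE B (Python) =====
-- def _build_research_block(parcel: dict, investigation: dict) -> tuple[str, bool]:
--     signals = (investigation or {}).get('signals') or []
--
--     # One pass: bucket each signal by category ('other' for anything unknown).
--     buckets = {'life_event': [], 'listing': [], 'financial': [], 'identity': [], 'other': []}
--     for s in signals:
--         c = s.get('category')
--         buckets[c if c in ('life_event', 'listing', 'financial', 'identity') else 'other'].append(s)
--
--     def typed_line(s):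
--         return f"  - {s.get('type', '?')}: {s.get('detail', '')} ({s.get('trust', 'medium')} trust)"
--
--     def warn_line(s):
--         return f"  ⚠ {s.get('detail', '')} ({s.get('trust', 'medium')} trust)"
--
--     def plain_line(s):
--         return f"  - {s.get('detail', '')} ({s.get('trust', 'medium')} trust)"
--
--     def other_line(s):
--         return f"  - {s.get('type', '?')}: {s.get('detail', '')}"
--
--     plan = [
--         ('life_event', '  LIFE EVENTS:', typed_line),
--         ('listing', '  LISTING HISTORY:', typed_line),
--         ('financial', '  FINANCIAL / RISK SIGNALS:', warn_line),
--         ('identity', '  WHO THEY ARE:', plain_line),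
--         ('other', '  OTHER SIGNALS:', other_line),
--     ]
--     sections = [
--         header + "\n" + "\n".join(fmt(s) for s in buckets[key])
--         for key, header, fmt in plan
--         if buckets[key]
--     ]
--
--     research = "\n".join(sections).strip()
--     has_substance = any(buckets[k] for k in ('life_event', 'listing', 'financial', 'identity'))
--     return research, has_substance
-- ===== Notes on version B (the rewrite author's own statement) =====
-- stated objective: simpler
-- what changed: Replaces A's five separate filter passes over the signal list and five copy-pasted formatting blocks with a single bucketing pass into a category dict plus one data-driven section plan (key, header, line-formatter) applied in the fixed output order.
import Mathlib
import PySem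

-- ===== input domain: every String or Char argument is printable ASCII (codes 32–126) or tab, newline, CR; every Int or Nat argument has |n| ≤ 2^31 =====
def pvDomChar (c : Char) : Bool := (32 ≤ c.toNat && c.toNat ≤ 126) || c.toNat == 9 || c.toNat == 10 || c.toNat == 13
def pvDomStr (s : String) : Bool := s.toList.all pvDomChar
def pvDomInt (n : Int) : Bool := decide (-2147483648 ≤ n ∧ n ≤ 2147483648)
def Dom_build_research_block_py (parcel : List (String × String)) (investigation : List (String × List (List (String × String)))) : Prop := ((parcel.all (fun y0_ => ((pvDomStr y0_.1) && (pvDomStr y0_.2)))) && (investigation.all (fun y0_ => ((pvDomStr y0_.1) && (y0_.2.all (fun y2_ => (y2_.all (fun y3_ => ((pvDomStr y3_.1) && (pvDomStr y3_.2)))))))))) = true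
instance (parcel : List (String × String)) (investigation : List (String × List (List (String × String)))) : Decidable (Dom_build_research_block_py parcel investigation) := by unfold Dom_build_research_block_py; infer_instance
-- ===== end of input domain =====

-- B replaces A's five filter passes over the signals by a single bucketing pass plus a
-- data-driven section plan (objective: simpler); exact output preserved.

-- ===== PORT A =====
-- dict.get(k) / dict.get(k, default) on an association list (first match, per the type convention)
def aGet? (s : List (String × String)) (k : String) : Option String :=
  (s.find? (fun p => p.1 == k)).map (·.2)

def aGetD (s : List (String × String)) (k d : String) : String :=
  (aGet? s k).getD d

-- f"  - {type}: {detail} ({trust} trust)"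
def aTypedLine (s : List (String × String)) : String :=
  "  - " ++ aGetD s "type" "?" ++ ": " ++ aGetD s "detail" "" ++ " (" ++ aGetD s "trust" "medium" ++ " trust)"

def build_research_block_py (parcel : List (String × String)) (investigation : List (String × List (List (String × String)))) : String × Bool :=
  -- (investigation or {}).get('signals') or []
  let signals := ((investigation.find? (fun p => p.1 == "signals")).map (·.2)).getD []
  let life_events := signals.filter (fun s => aGet? s "category" == some "life_event")
  let listings    := signals.filter (fun s => aGet? s "category" == some "listing")
  let identity    := signals.filter (fun s => aGet? s "category" == some "identity")
  let financial   := signals.filter (fun s => aGet? s "category" == some "financial")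
  let other       := signals.filter (fun s =>
    !(aGet? s "category" == some "life_event" || aGet? s "category" == some "listing"
      || aGet? s "category" == some "identity" || aGet? s "category" == some "financial"))
  let sections : List String :=
    (if life_events.isEmpty then [] else
      ["  LIFE EVENTS:\n" ++ PySem.Str.join "\n" (life_events.map aTypedLine)]) ++
    (if listings.isEmpty then [] else
      ["  LISTING HISTORY:\n" ++ PySem.Str.join "\n" (listings.map aTypedLine)]) ++
    (if financial.isEmpty then [] else
      ["  FINANCIAL / RISK SIGNALS:\n" ++ PySem.Str.join "\n"
        (financial.map (fun s => "  ⚠ " ++ aGetD s "detail" "" ++ " (" ++ aGetD s "trust" "medium" ++ " trust)"))]) ++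
    (if identity.isEmpty then [] else
      ["  WHO THEY ARE:\n" ++ PySem.Str.join "\n"
        (identity.map (fun s => "  - " ++ aGetD s "detail" "" ++ " (" ++ aGetD s "trust" "medium" ++ " trust)"))]) ++
    (if other.isEmpty then [] else
      ["  OTHER SIGNALS:\n" ++ PySem.Str.join "\n"
        (other.map (fun s => "  - " ++ aGetD s "type" "?" ++ ": " ++ aGetD s "detail" ""))])
  let research := PySem.Str.strip (PySem.Str.join "\n" sections)
  let has_substance := !life_events.isEmpty || !financial.isEmpty || !identity.isEmpty || !listings.isEmpty
  (research, has_substance)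

-- ===== PORT B =====
def bGet? (s : List (String × String)) (k : String) : Option String :=
  (s.find? (fun p => p.1 == k)).map (·.2)

def bGetD (s : List (String × String)) (k d : String) : String :=
  (bGet? s k).getD d

def bTypedLine (s : List (String × String)) : String :=
  "  - " ++ bGetD s "type" "?" ++ ": " ++ bGetD s "detail" "" ++ " (" ++ bGetD s "trust" "medium" ++ " trust)"

def bWarnLine (s : List (String × String)) : String :=
  "  ⚠ " ++ bGetD s "detail" "" ++ " (" ++ bGetD s "trust" "medium" ++ " trust)"

def bPlainLine (s : List (String × String)) : String :=
  "  - " ++ bGetD s "detail" "" ++ " (" ++ bGetD s "trust" "medium" ++ " trust)"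

def bOtherLine (s : List (String × String)) : String :=
  "  - " ++ bGetD s "type" "?" ++ ": " ++ bGetD s "detail" ""

-- one pass over the signals, building the five buckets (order preserved within each)
def bBuckets : List (List (String × String)) →
    List (List (String × String)) × List (List (String × String)) × List (List (String × String))
      × List (List (String × String)) × List (List (String × String))
  | [] => ([], [], [], [], [])
  | s :: t =>
    let (le, li, fi, id, ot) := bBuckets t
    let c := bGet? s "category"
    if c == some "life_event" then (s :: le, li, fi, id, ot)
    else if c == some "listing" then (le, s :: li, fi, id, ot)
    else if c == some "financial" then (le, li, s :: fi, id, ot)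
    else if c == some "identity" then (le, li, fi, s :: id, ot)
    else (le, li, fi, id, s :: ot)

def bSection (header : String) (lines : List String) : List String :=
  if lines.isEmpty then [] else [header ++ "\n" ++ PySem.Str.join "\n" lines]

def build_research_block_py_alt (parcel : List (String × String)) (investigation : List (String × List (List (String × String)))) : String × Bool :=
  let signals := ((investigation.find? (fun p => p.1 == "signals")).map (·.2)).getD []
  let (le, li, fi, id, ot) := bBuckets signals
  let sections :=
    bSection "  LIFE EVENTS:" (le.map bTypedLine) ++
    bSection "  LISTING HISTORY:" (li.map bTypedLine) ++
    bSection "  FINANCIAL / RISK SIGNALS:" (fi.map bWarnLine) ++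
    bSection "  WHO THEY ARE:" (id.map bPlainLine) ++
    bSection "  OTHER SIGNALS:" (ot.map bOtherLine)
  let research := PySem.Str.strip (PySem.Str.join "\n" sections)
  let has_substance := [le, li, fi, id].any (fun l => !l.isEmpty)
  (research, has_substance)

-- ===== PRECONDITION & SPEC =====
def Spec_build_research_block_py (parcel : List (String × String)) (investigation : List (String × List (List (String × String)))) (out : String × Bool) : Prop := out = build_research_block_py_alt parcel investigation
instance (parcel : List (String × String)) (investigation : List (String × List (List (String × String)))) (out : String × Bool) : Decidable (Spec_build_research_block_py parcel investigation out) := by unfold Spec_build_research_block_py; infer_instance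

-- ===== CLAIM (what is proved, stated in full; the proofs are below) =====
def Claim_equal_build_research_block_py : Prop := ∀ (parcel : List (String × String)) (investigation : List (String × List (List (String × String)))), Dom_build_research_block_py parcel investigation → Spec_build_research_block_py parcel investigation (build_research_block_py parcel investigation)

-- ===== LEMMAS AND PROOFS =====

-- B's single bucketing pass produces exactly A's five filtered lists.
theorem bBuckets_eq_filters (signals : List (List (String × String))) :
    bBuckets signals =
      (signals.filter (fun s => bGet? s "category" == some "life_event"),
       signals.filter (fun s => bGet? s "category" == some "listing"),
       signals.filter (fun s => bGet? s "category" == some "financial"),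
       signals.filter (fun s => bGet? s "category" == some "identity"),
       signals.filter (fun s =>
         !(bGet? s "category" == some "life_event" || bGet? s "category" == some "listing"
           || bGet? s "category" == some "identity" || bGet? s "category" == some "financial"))) := by
  induction signals with
  | nil => rfl
  | cons s t ih =>
    simp only [bBuckets, ih, List.filter_cons]
    by_cases h1 : bGet? s "category" == some "life_event" <;>
      by_cases h2 : bGet? s "category" == some "listing" <;>
        by_cases h3 : bGet? s "category" == some "financial" <;>
          by_cases h4 : bGet? s "category" == some "identity" <;>
            simp_all

-- has_substance: A tests the buckets in the order (life, financial, identity, listing), B in output order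
theorem or4_comm (a b c d : Bool) : (a || c || d || b) = (a || (b || (c || d))) := by
  cases a <;> cases b <;> cases c <;> cases d <;> rfl

-- B's named line formatters are definitionally A's inline templates
theorem mapT (xs : List (List (String × String))) : xs.map bTypedLine = xs.map aTypedLine := rfl
theorem mapW (xs : List (List (String × String))) :
    xs.map bWarnLine = xs.map (fun s => "  ⚠ " ++ aGetD s "detail" "" ++ " (" ++ aGetD s "trust" "medium" ++ " trust)") := rfl
theorem mapP (xs : List (List (String × String))) :
    xs.map bPlainLine = xs.map (fun s => "  - " ++ aGetD s "detail" "" ++ " (" ++ aGetD s "trust" "medium" ++ " trust)") := rfl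
theorem mapO (xs : List (List (String × String))) :
    xs.map bOtherLine = xs.map (fun s => "  - " ++ aGetD s "type" "?" ++ ": " ++ aGetD s "detail" "") := rfl

theorem build_research_block_py_spec : Claim_equal_build_research_block_py := by
  intro parcel investigation _
  show build_research_block_py parcel investigation = build_research_block_py_alt parcel investigation
  simp only [build_research_block_py, build_research_block_py_alt, bBuckets_eq_filters,
    bSection, mapT, mapW, mapP, mapO, List.isEmpty_map, aGet?, aGetD, aTypedLine,
    List.any_cons, List.any_nil, Bool.or_false, String.append_assoc]
  congr 1
  exact or4_comm _ _ _ _
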